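-- pv_equiv track=rewrite | github.com/PiaSommerauer/SPT_crowd_data_analysis | scripts/analyze_iaa.py | coder_pairs
-- ===== SOURCE A (Python) =====
-- def coder_pairs(n_annotators):
--
--     annotators = list(range(n_annotators))
--     pairs = set()
--     for i in annotators:
--         for j in annotators:
--             if i != j:
--                 pair = (i, j)
--                 pair_rev = (j, i)
--                 if pair_rev not in pairs:
--                     pairs.add(pair)
--     return pairs
-- ===== SOURCE B (Python) =====
-- def coder_pairs(n_annotators):
--     return {(i, j) for i in range(n_annotators) for j in range(i + 1, n_annotators)}
-- ===== Notes on version B (the rewrite author's own statement) =====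
-- stated objective: simpler
-- what changed: Replaces the full n×n double loop with an i!=j test and a reversed-pair membership dedup by a direct upper-triangle comprehension that generates each i<j pair exactly once, with no auxiliary dedup structure or membership tests.
import Mathlib
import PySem

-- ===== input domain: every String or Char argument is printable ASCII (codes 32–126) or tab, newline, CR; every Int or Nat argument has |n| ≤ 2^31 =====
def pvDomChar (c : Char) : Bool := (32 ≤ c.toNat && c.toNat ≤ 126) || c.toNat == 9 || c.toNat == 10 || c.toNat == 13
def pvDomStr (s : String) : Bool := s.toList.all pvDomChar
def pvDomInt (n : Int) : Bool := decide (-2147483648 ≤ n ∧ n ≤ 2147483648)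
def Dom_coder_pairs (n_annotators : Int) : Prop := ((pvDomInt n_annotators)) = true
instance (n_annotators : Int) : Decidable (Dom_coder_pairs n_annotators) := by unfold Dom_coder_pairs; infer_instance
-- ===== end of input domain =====

-- B replaces A's n×n loop with reversed-pair dedup set by a direct upper-triangle comprehension (simpler).

-- ===== PORT A =====
def coder_pairs (n_annotators : Int) : List (Int × Int) :=
  let annotators := PySem.List.pyRange 0 n_annotators 1
  annotators.foldl (fun pairs i =>
    annotators.foldl (fun pairs j =>
      if i ≠ j then
        let pair := (i, j)
        let pair_rev := (j, i)
        if ¬ (PySem.Set.contains pairs pair_rev) then PySem.Set.add pairs pair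
        else pairs
      else pairs) pairs) PySem.Set.empty

-- ===== PORT B =====
def coder_pairs_alt (n_annotators : Int) : List (Int × Int) :=
  PySem.Set.ofList
    ((PySem.List.pyRange 0 n_annotators 1).flatMap (fun i =>
      (PySem.List.pyRange (i + 1) n_annotators 1).map (fun j => (i, j))))

-- ===== PRECONDITION & SPEC =====
def Spec_coder_pairs (n_annotators : Int) (out : List (Int × Int)) : Prop := out = coder_pairs_alt n_annotators
instance (n_annotators : Int) (out : List (Int × Int)) : Decidable (Spec_coder_pairs n_annotators out) := by unfold Spec_coder_pairs; infer_instance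

-- ===== CLAIM (what is proved, stated in full; the proofs are below) =====
def Claim_equal_coder_pairs : Prop := ∀ (n_annotators : Int), Dom_coder_pairs n_annotators → Spec_coder_pairs n_annotators (coder_pairs n_annotators)

-- ===== LEMMAS AND PROOFS =====

-- the loop body of A's inner loop
def pvStep (i : Int) (pairs : PySem.Set (Int × Int)) (j : Int) : PySem.Set (Int × Int) :=
  if i ≠ j then
    if ¬ (PySem.Set.contains pairs (j, i)) then PySem.Set.add pairs (i, j) else pairs
  else pairs

-- row i of the upper triangle, bound n
def pvRow (n i : Int) : List (Int × Int) :=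
  (PySem.List.pyRange (i + 1) n 1).map (fun j => (i, j))

-- first i rows of the upper triangle
def pvTri (n i : Int) : List (Int × Int) :=
  (PySem.List.pyRange 0 i 1).flatMap (fun a => pvRow n a)

theorem mem_pvRow (n a p q : Int) : (p, q) ∈ pvRow n a ↔ p = a ∧ a < q ∧ q < n := by
  unfold pvRow
  rw [List.mem_map]
  constructor
  · rintro ⟨j, hj, heq⟩
    rw [PySem.List.mem_pyRange_one] at hj
    rw [Prod.mk.injEq] at heq
    obtain ⟨rfl, rfl⟩ := heq
    omega
  · rintro ⟨rfl, h1, h2⟩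
    exact ⟨q, by rw [PySem.List.mem_pyRange_one]; omega, rfl⟩

theorem mem_pvTri (n i p q : Int) : (p, q) ∈ pvTri n i ↔ 0 ≤ p ∧ p < i ∧ p < q ∧ q < n := by
  unfold pvTri
  rw [List.mem_flatMap]
  constructor
  · rintro ⟨a, ha, hmem⟩
    rw [PySem.List.mem_pyRange_one] at ha
    rw [mem_pvRow] at hmem
    omega
  · rintro ⟨h0, hi, hpq, hqn⟩
    exact ⟨p, by rw [PySem.List.mem_pyRange_one]; omega, by rw [mem_pvRow]; omega⟩

theorem pvTri_succ (n : Int) (i : Int) (h : 0 ≤ i) :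
    pvTri n (i + 1) = pvTri n i ++ pvRow n i := by
  unfold pvTri
  rw [PySem.List.pyRange_one_succ_right h, List.flatMap_append]
  simp

theorem nodup_pvRow (n a : Int) : (pvRow n a).Nodup := by
  refine List.Nodup.map ?_ (PySem.List.nodup_pyRange_one _ _)
  intro x y h; simpa using h

theorem nodup_pvTri (n i : Int) : (pvTri n i).Nodup := by
  rcases le_or_gt i 0 with hi | hi
  · simp [pvTri, PySem.List.pyRange_one_eq_nil hi]
  · obtain ⟨k, rfl⟩ : ∃ k : Nat, i = (k : Int) := ⟨i.toNat, by omega⟩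
    clear hi
    induction k with
    | zero => simp [pvTri, PySem.List.pyRange_one_eq_nil]
    | succ m ih =>
      rw [show ((Nat.succ m : Nat) : Int) = (m : Int) + 1 by omega,
        pvTri_succ n m (by positivity)]
      refine List.Nodup.append ih (nodup_pvRow n m) ?_
      intro x hx hx'
      obtain ⟨p, q⟩ := x
      rw [mem_pvTri] at hx
      rw [mem_pvRow] at hx'
      omega

theorem foldl_fix {α β : Type} (f : β → α → β) (s : β) (l : List α)
    (h : ∀ x ∈ l, f s x = s) : l.foldl f s = s := by
  induction l with
  | nil => rfl
  | cons a t ih =>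
    simp only [List.foldl_cons, h a (by simp)]
    exact ih (fun x hx => h x (List.mem_cons_of_mem _ hx))

theorem phase1 (n i : Int) (hin : i < n) :
    (PySem.List.pyRange 0 i 1).foldl (pvStep i) (pvTri n i) = pvTri n i := by
  apply foldl_fix
  intro j hj
  rw [PySem.List.mem_pyRange_one] at hj
  unfold pvStep
  have hne : i ≠ j := by omega
  have hmem : (j, i) ∈ pvTri n i := by rw [mem_pvTri]; omega
  rw [if_pos hne, if_neg]
  simpa using hmem

theorem phase3 (n i : Int) (hi : 0 ≤ i) (k : Nat) :
    ∀ m : Int, i < m → m + k = n →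
    (PySem.List.pyRange m n 1).foldl (pvStep i)
        (pvTri n i ++ (PySem.List.pyRange (i + 1) m 1).map (fun j => (i, j)))
      = pvTri n i ++ pvRow n i := by
  induction k with
  | zero =>
    intro m him hmn
    have : m = n := by omega
    subst this
    rw [PySem.List.pyRange_one_eq_nil le_rfl]
    rfl
  | succ k ih =>
    intro m him hmn
    have hmn' : m < n := by omega
    rw [PySem.List.pyRange_one_cons hmn', List.foldl_cons]
    have hstep : pvStep i (pvTri n i ++ (PySem.List.pyRange (i + 1) m 1).map (fun j => (i, j))) m
        = pvTri n i ++ (PySem.List.pyRange (i + 1) (m + 1) 1).map (fun j => (i, j)) := by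
      unfold pvStep
      have hne : i ≠ m := by omega
      have hnotrev : ((m, i)) ∉ pvTri n i ++ (PySem.List.pyRange (i + 1) m 1).map (fun j => (i, j)) := by
        intro h
        rcases List.mem_append.mp h with h | h
        · rw [mem_pvTri] at h; omega
        · obtain ⟨j, hj, hj2⟩ := List.mem_map.mp h
          have h1 : (i : Int) = m := congrArg Prod.fst hj2
          omega
      have hnotmem : ((i, m)) ∉ pvTri n i ++ (PySem.List.pyRange (i + 1) m 1).map (fun j => (i, j)) := by
        intro h
        rcases List.mem_append.mp h with h | h
        · rw [mem_pvTri] at h; omega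
        · obtain ⟨j, hj, hj2⟩ := List.mem_map.mp h
          rw [PySem.List.mem_pyRange_one] at hj
          have h2 : j = m := congrArg Prod.snd hj2
          omega
      rw [if_pos hne, if_pos (by simpa using hnotrev),
        PySem.Set.add_of_not_mem hnotmem,
        PySem.List.pyRange_one_succ_right (by omega : i + 1 ≤ m), List.map_append,
        List.append_assoc]
      simp
    rw [hstep]
    exact ih (m + 1) (by omega) (by omega)

theorem inner_lemma (n i : Int) (hi : 0 ≤ i) (hin : i < n) :
    (PySem.List.pyRange 0 n 1).foldl (pvStep i) (pvTri n i) = pvTri n (i + 1) := by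
  have hsplit : PySem.List.pyRange 0 n 1
      = PySem.List.pyRange 0 i 1 ++ (i :: PySem.List.pyRange (i + 1) n 1) := by
    rw [PySem.List.pyRange_one_append 0 i n hi (by omega),
      PySem.List.pyRange_one_cons hin]
  rw [hsplit, List.foldl_append, phase1 n i hin, List.foldl_cons]
  have hstepi : pvStep i (pvTri n i) i = pvTri n i := by
    unfold pvStep; simp
  rw [hstepi]
  have := phase3 n i hi (n - (i + 1)).toNat (i + 1) (by omega) (by omega)
  rw [PySem.List.pyRange_one_eq_nil (le_refl (i + 1)), List.map_nil, List.append_nil] at this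
  rw [this, pvTri_succ n i hi]

theorem outer_lemma (n : Int) (k : Nat) :
    ∀ i : Int, 0 ≤ i → i + k = n →
    (PySem.List.pyRange i n 1).foldl
        (fun pairs a => (PySem.List.pyRange 0 n 1).foldl (pvStep a) pairs) (pvTri n i)
      = pvTri n n := by
  induction k with
  | zero =>
    intro i hi hik
    have : i = n := by omega
    subst this
    rw [PySem.List.pyRange_one_eq_nil le_rfl]
    rfl
  | succ k ih =>
    intro i hi hik
    have hin : i < n := by omega
    rw [PySem.List.pyRange_one_cons hin, List.foldl_cons, inner_lemma n i hi hin]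
    exact ih (i + 1) (by omega) (by omega)

theorem coder_pairs_eq_tri (n : Int) : coder_pairs n = pvTri n n := by
  have hA : coder_pairs n = (PySem.List.pyRange 0 n 1).foldl
      (fun pairs i => (PySem.List.pyRange 0 n 1).foldl (pvStep i) pairs) PySem.Set.empty := rfl
  rw [hA]
  rcases le_or_gt n 0 with hn | hn
  · rw [PySem.List.pyRange_one_eq_nil hn]
    simp [pvTri, PySem.List.pyRange_one_eq_nil hn, PySem.Set.empty]
  · obtain ⟨k, hk⟩ : ∃ k : Nat, (0 : Int) + k = n := ⟨n.toNat, by omega⟩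
    have h := outer_lemma n k 0 le_rfl hk
    have htri0 : pvTri n 0 = [] := by
      simp [pvTri, PySem.List.pyRange_one_eq_nil (le_refl (0 : Int))]
    rw [htri0] at h
    exact h

theorem coder_pairs_alt_eq_tri (n : Int) : coder_pairs_alt n = pvTri n n := by
  unfold coder_pairs_alt
  have : ((PySem.List.pyRange 0 n 1).flatMap (fun i =>
      (PySem.List.pyRange (i + 1) n 1).map (fun j => (i, j)))) = pvTri n n := rfl
  rw [this]
  exact PySem.Set.ofList_eq_self_of_nodup _ (nodup_pvTri n n)

-- ===== VERDICT (by name: the statement is the Claim_ definition above) =====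
theorem coder_pairs_spec : Claim_equal_coder_pairs := by
  intro n _
  unfold Spec_coder_pairs
  rw [coder_pairs_eq_tri, coder_pairs_alt_eq_tri]
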